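-- pv_equiv track=rewrite | github.com/mrtejasshah/phishgurd_windows | core/phishing_detector.py | _has_character_substitution
-- ===== SOURCE A (Python) =====
-- def _has_character_substitution(s1, s2):
--     """Check for common character substitutions (e.g., 0 for o, 1 for l)"""
--     substitutions = {
--         '0': 'o', 'o': '0',
--         '1': 'l', 'l': '1', 'i': '1', '1': 'i',
--         '5': 's', 's': '5',
--         '3': 'e', 'e': '3',
--         'rn': 'm', 'm': 'rn',
--         'vv': 'w', 'w': 'vv'
--     }
--
--     # Try substituting each character and check if strings match
--     for i in range(len(s1)):
--         if i < len(s1):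
--             char = s1[i]
--             if char in substitutions:
--                 s1_mod = s1[:i] + substitutions[char] + s1[i+1:]
--                 if s1_mod == s2:
--                     return True
--
--     # Try the same for s2
--     for i in range(len(s2)):
--         if i < len(s2):
--             char = s2[i]
--             if char in substitutions:
--                 s2_mod = s2[:i] + substitutions[char] + s2[i+1:]
--                 if s2_mod == s1:
--                     return True
--
--     return False
-- ===== SOURCE B (Python) =====
-- def _sub(c):
--     """Replacement for the single look-alike characters A's dict can actually hit."""
--     if c == '0': return 'o'
--     elif c == 'o': return '0'
--     elif c == '1': return 'i'
--     elif c == 'l': return '1'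
--     elif c == 'i': return '1'
--     elif c == '5': return 's'
--     elif c == 's': return '5'
--     elif c == '3': return 'e'
--     elif c == 'e': return '3'
--     elif c == 'm': return 'rn'
--     elif c == 'w': return 'vv'
--     else: return None
--
--
-- def _attempt(x, y):
--     # can replacing x's first character turn x into y?
--     if not x:
--         return False
--     r = _sub(x[0])
--     return r is not None and y[:len(r)] == r and x[1:] == y[len(r):]
--
--
-- def _has_character_substitution(s1, s2):
--     """Check for common character substitutions (e.g., 0 for o, 1 for l).
--
--     A successful substitution must occur exactly at the first position where
--     the strings disagree, so strip the common prefix once and test only that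
--     position, in both directions (linear time).
--     """
--     p = 0
--     n = len(s1) if len(s1) < len(s2) else len(s2)
--     while p < n and s1[p] == s2[p]:
--         p += 1
--     x, y = s1[p:], s2[p:]
--     return _attempt(x, y) or _attempt(y, x)
-- ===== Notes on version B (the rewrite author's own statement) =====
-- stated objective: faster
-- what changed: Instead of trying a substitution at every position and rebuilding the whole string each time (quadratic), B strips the common prefix once and tests a substitution only at the first mismatch in each direction, with the lookup table as a small branch function instead of a dict.
import Mathlib
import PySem

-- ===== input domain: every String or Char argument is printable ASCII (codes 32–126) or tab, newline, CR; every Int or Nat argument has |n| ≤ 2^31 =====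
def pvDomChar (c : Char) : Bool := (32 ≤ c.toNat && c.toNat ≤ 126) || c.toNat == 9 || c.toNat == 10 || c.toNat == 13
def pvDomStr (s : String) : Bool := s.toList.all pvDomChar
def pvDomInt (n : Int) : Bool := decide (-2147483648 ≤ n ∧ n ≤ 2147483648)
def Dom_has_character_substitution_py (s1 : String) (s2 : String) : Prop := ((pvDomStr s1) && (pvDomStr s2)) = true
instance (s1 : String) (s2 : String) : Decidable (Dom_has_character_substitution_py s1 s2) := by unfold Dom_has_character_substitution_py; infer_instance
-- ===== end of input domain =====

-- B replaces A's quadratic try-every-position scan by stripping the common prefix once and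
-- testing a substitution only at the first mismatch, in each direction (objective: faster).

-- ===== PORT A =====
-- Python's dict literal, strings modeled as List Char (PySem.Chars convention).
-- The duplicate key '1' ('1':'l' later overwritten by '1':'i') resolves, as in Python,
-- to '1' ↦ 'i' kept at the first key's position.
def pvSubsA : PySem.Dict (List Char) (List Char) :=
  PySem.Dict.mk [(['0'],['o']),(['o'],['0']),(['1'],['i']),(['l'],['1']),(['i'],['1']),
                 (['5'],['s']),(['s'],['5']),(['3'],['e']),(['e'],['3']),
                 (['r','n'],['m']),(['m'],['r','n']),(['v','v'],['w']),(['w'],['v','v'])]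

-- one of A's two identical for-loops: for i in range(len(a)): if i < len(a): …
-- ('char in substitutions' followed by 'substitutions[char]' is the match on get?;
--  s[:i] and s[i+1:] are PySem slices; List.any is the loop with early return True)
def pvLoopA (a b : List Char) : Bool :=
  (List.range a.length).any fun i =>
    if i < a.length then
      match PySem.List.pyGet? a (i : Int) with
      | some c =>
        match pvSubsA.get? [c] with
        | some r =>
            PySem.List.slice a none (some (i : Int)) ++ r
              ++ PySem.List.slice a (some ((i : Int) + 1)) none == b
        | none => false
      | none => false
    else false

def has_character_substitution_py (s1 : String) (s2 : String) : Bool :=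
  pvLoopA s1.toList s2.toList || pvLoopA s2.toList s1.toList

-- ===== PORT B =====
-- Source B's _sub: the if/elif chain, branch for branch ('return None' is the final none)
def pvSub (c : Char) : Option (List Char) :=
  if c = '0' then some ['o']
  else if c = 'o' then some ['0']
  else if c = '1' then some ['i']
  else if c = 'l' then some ['1']
  else if c = 'i' then some ['1']
  else if c = '5' then some ['s']
  else if c = 's' then some ['5']
  else if c = '3' then some ['e']
  else if c = 'e' then some ['3']
  else if c = 'm' then some ['r','n']
  else if c = 'w' then some ['v','v']
  else none

-- Source B's _attempt: 'if not x' + x[0] + x[1:] is the cons match; 'r is None' the option match;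
-- y[:len(r)] and y[len(r):] are PySem slices
def pvAttempt (x y : List Char) : Bool :=
  match x with
  | [] => false
  | c :: xs =>
    match pvSub c with
    | none => false
    | some r =>
        (PySem.List.slice y none (some (r.length : Int)) == r)
          && (xs == PySem.List.slice y (some (r.length : Int)) none)

-- Source B's while loop computing the common-prefix length p (n = min of the lengths)
def pvCpl : List Char → List Char → Nat
  | x :: xs, y :: ys => if x = y then pvCpl xs ys + 1 else 0
  | _, _ => 0

def has_character_substitution_py_alt (s1 : String) (s2 : String) : Bool :=
  let a := s1.toList
  let b := s2.toList
  let p := pvCpl a b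
  let x := PySem.List.slice a (some (p : Int)) none
  let y := PySem.List.slice b (some (p : Int)) none
  pvAttempt x y || pvAttempt y x

-- ===== PRECONDITION & SPEC =====
def Spec_has_character_substitution_py (s1 : String) (s2 : String) (out : Bool) : Prop := out = has_character_substitution_py_alt s1 s2
instance (s1 : String) (s2 : String) (out : Bool) : Decidable (Spec_has_character_substitution_py s1 s2 out) := by unfold Spec_has_character_substitution_py; infer_instance

-- ===== CLAIM (what is proved, stated in full; the proofs are below) =====
def Claim_equal_has_character_substitution_py : Prop := ∀ (s1 : String) (s2 : String), Dom_has_character_substitution_py s1 s2 → Spec_has_character_substitution_py s1 s2 (has_character_substitution_py s1 s2)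

-- ===== LEMMAS AND PROOFS =====

-- A's dict, applied to a single-character key, is exactly B's _sub
set_option maxHeartbeats 1000000 in
theorem pvSub_eq (c : Char) : pvSubsA.get? [c] = pvSub c := by
  unfold pvSub
  split_ifs with h0 h1 h2 h3 h4 h5 h6 h7 h8 h9 h10
  · subst h0; decide
  · subst h1; decide
  · subst h2; decide
  · subst h3; decide
  · subst h4; decide
  · subst h5; decide
  · subst h6; decide
  · subst h7; decide
  · subst h8; decide
  · subst h9; decide
  · subst h10; decide
  · simp only [pvSubsA, PySem.Dict.get?_mk_cons, List.cons_beq_cons, Bool.and_eq_true,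
      beq_iff_eq, and_true, reduceCtorEq, and_false, if_false]
    rw [if_neg (fun h => h0 h.symm), if_neg (fun h => h1 h.symm), if_neg (fun h => h2 h.symm),
      if_neg (fun h => h3 h.symm), if_neg (fun h => h4 h.symm), if_neg (fun h => h5 h.symm),
      if_neg (fun h => h6 h.symm), if_neg (fun h => h7 h.symm), if_neg (fun h => h8 h.symm),
      if_neg (fun h => h9 h.symm), if_neg (fun h => h10 h.symm)]
    simp [PySem.Dict.get?]

-- any replacement string in the table starts with a character different from its key
set_option maxHeartbeats 1000000 in
theorem pvSub_head (c : Char) (r : List Char) (h : pvSub c = some r) :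
    ∃ r0 rs, r = r0 :: rs ∧ r0 ≠ c := by
  unfold pvSub at h
  split_ifs at h with h0 h1 h2 h3 h4 h5 h6 h7 h8 h9 h10
  all_goals try (obtain rfl := Option.some.inj h; subst_vars; exact ⟨_, _, rfl, by decide⟩)

theorem pvCpl_comm (a b : List Char) : pvCpl a b = pvCpl b a := by
  induction a generalizing b with
  | nil => cases b <;> simp [pvCpl]
  | cons x xs ih => cases b <;> simp [pvCpl, eq_comm, ih]

theorem pvCpl_take (a b : List Char) : a.take (pvCpl a b) = b.take (pvCpl a b) := by
  induction a generalizing b with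
  | nil => simp [pvCpl]
  | cons x xs ih =>
    cases b with
    | nil => simp [pvCpl]
    | cons y ys => by_cases hxy : x = y <;> simp [pvCpl, hxy, ih]

theorem pvCpl_get (a b : List Char) (j : Nat) (hj : j < pvCpl a b) : a[j]? = b[j]? := by
  have h1 := pvCpl_take a b
  have := congrArg (fun l => l[j]?) h1
  simpa [List.getElem?_take, hj] using this

theorem pvCpl_ne (a b : List Char) (h1 : pvCpl a b < a.length) (h2 : pvCpl a b < b.length) :
    a[pvCpl a b]? ≠ b[pvCpl a b]? := by
  induction a generalizing b with
  | nil => simp [pvCpl] at h1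
  | cons x xs ih =>
    cases b with
    | nil => simp [pvCpl] at h2
    | cons y ys =>
      by_cases hxy : x = y
      · simp only [pvCpl, if_pos hxy] at h1 h2 ⊢
        simpa [hxy] using ih ys (by simpa using h1) (by simpa using h2)
      · simp [pvCpl, hxy]

-- the modified string A builds at position i
def pvMod (a : List Char) (i : Nat) (r : List Char) : List Char :=
  a.take i ++ r ++ a.drop (i + 1)

-- i below the common-prefix length: the modified list carries r's head there, but a and b agree
theorem pvMod_ne_lt (a b : List Char) (i : Nat) (c r0 : Char) (rs : List Char)
    (hi : i < a.length) (hib : a[i]? = b[i]?) (hc : a[i]? = some c) (hr : r0 ≠ c) :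
    pvMod a i (r0 :: rs) ≠ b := by
  intro h
  have hlen : (a.take i).length = i := by simp; omega
  have hmod : (pvMod a i (r0 :: rs))[i]? = some r0 := by
    unfold pvMod
    rw [List.append_assoc, List.getElem?_append_right (by omega), hlen]
    simp
  rw [h, ← hib, hc] at hmod
  exact hr (Option.some.inj hmod).symm

-- i above the common-prefix length p: the modified list still carries a[p] ≠ b[p] at p
theorem pvMod_ne_gt (a b : List Char) (p i : Nat) (r : List Char)
    (hpa : p < a.length) (hpi : p < i) (hi : i ≤ a.length)
    (hne : p < b.length → a[p]? ≠ b[p]?) :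
    pvMod a i r ≠ b := by
  intro h
  have hlen : (a.take i).length = i := by simp; omega
  have hmod : (pvMod a i r)[p]? = a[p]? := by
    unfold pvMod
    rw [List.append_assoc, List.getElem?_append_left (by omega : p < (a.take i).length),
      List.getElem?_take_of_lt hpi]
  have hpb : p < b.length := by
    have h2 : b[p]? = a[p]? := by rw [← h, hmod]
    have h3 : b[p]?.isSome := by rw [h2]; simp [hpa]
    simpa using h3
  exact hne hpb (by rw [← h, hmod])

-- at the candidate position, A's equality test is exactly B's two suffix tests
theorem pvMod_p_iff (a b r : List Char) (p : Nat) (hp : p < a.length)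
    (ht : a.take p = b.take p) :
    (pvMod a p r = b) ↔
      ((b.drop p).take r.length = r ∧ a.drop (p + 1) = (b.drop p).drop r.length) := by
  have hlen : (a.take p).length = p := by simp; omega
  constructor
  · intro h
    have hdrop : b.drop p = r ++ a.drop (p + 1) := by
      rw [← h]; unfold pvMod
      rw [List.append_assoc, List.drop_left' hlen]
    refine ⟨by rw [hdrop, List.take_left], ?_⟩
    rw [hdrop, List.drop_left]
  · rintro ⟨h1, h2⟩
    unfold pvMod
    conv_rhs => rw [← List.take_append_drop p b]
    rw [← ht, List.append_assoc]
    congr 1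
    conv_rhs => rw [← List.take_append_drop r.length (b.drop p)]
    rw [h1, h2]

-- A's whole loop over (a, b) is B's single test at the first mismatch
theorem pvLoopA_eq (a b : List Char) :
    pvLoopA a b = pvAttempt (a.drop (pvCpl a b)) (b.drop (pvCpl a b)) := by
  set p := pvCpl a b with hp
  rw [Bool.eq_iff_iff]
  constructor
  · intro h
    rw [pvLoopA, List.any_eq_true] at h
    obtain ⟨i, hmem, hbody⟩ := h
    rw [List.mem_range] at hmem
    rw [if_pos hmem, PySem.List.pyGet?_natCast, List.getElem?_eq_getElem hmem] at hbody
    dsimp only at hbody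
    cases hsub : pvSubsA.get? [a[i]] with
    | none => rw [hsub] at hbody; exact absurd hbody (by simp)
    | some r =>
      rw [hsub] at hbody
      dsimp only at hbody
      have hcast : ((i : Int) + 1) = (((i + 1 : Nat)) : Int) := by push_cast; ring
      rw [hcast, PySem.List.slice_to_natCast, PySem.List.slice_from_natCast, beq_iff_eq] at hbody
      have hmod : pvMod a i r = b := hbody
      rw [pvSub_eq] at hsub
      rcases lt_trichotomy i p with hlt | heq | hgt
      · obtain ⟨r0, rs, rfl, hr0⟩ := pvSub_head _ _ hsub
        exact absurd hmod (pvMod_ne_lt a b i a[i] r0 rs hmem (pvCpl_get a b i hlt)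
          (List.getElem?_eq_getElem hmem) hr0)
      · subst heq
        obtain ⟨h1, h2⟩ := (pvMod_p_iff a b r p hmem (pvCpl_take a b)).mp hmod
        rw [List.drop_eq_getElem_cons hmem, pvAttempt]
        rw [hsub]
        dsimp only
        rw [PySem.List.slice_to_natCast, PySem.List.slice_from_natCast]
        simp only [Bool.and_eq_true, beq_iff_eq]
        exact ⟨h1, h2⟩
      · exact absurd hmod (pvMod_ne_gt a b p i r (by omega) hgt (by omega)
          (fun hb => pvCpl_ne a b (by omega) hb))
  · intro h
    have hlen : p < a.length := by
      by_contra hc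
      rw [List.drop_eq_nil_of_le (by omega)] at h
      rw [pvAttempt] at h
      exact absurd h (by simp)
    rw [List.drop_eq_getElem_cons hlen, pvAttempt] at h
    cases hsub : pvSub a[p] with
    | none => rw [hsub] at h; exact absurd h (by simp)
    | some r =>
      rw [hsub] at h
      dsimp only at h
      rw [PySem.List.slice_to_natCast, PySem.List.slice_from_natCast] at h
      simp only [Bool.and_eq_true, beq_iff_eq] at h
      obtain ⟨h1, h2⟩ := h
      have hmod : pvMod a p r = b :=
        (pvMod_p_iff a b r p hlen (pvCpl_take a b)).mpr ⟨h1, h2⟩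
      rw [pvLoopA, List.any_eq_true]
      refine ⟨p, List.mem_range.mpr hlen, ?_⟩
      rw [if_pos hlen, PySem.List.pyGet?_natCast, List.getElem?_eq_getElem hlen]
      dsimp only
      rw [pvSub_eq, hsub]
      dsimp only
      have hcast : ((p : Int) + 1) = (((p + 1 : Nat)) : Int) := by push_cast; ring
      rw [hcast, PySem.List.slice_to_natCast, PySem.List.slice_from_natCast, beq_iff_eq]
      exact hmod

-- ===== VERDICT (by name: the statement is the Claim_ definition above) =====
theorem has_character_substitution_py_spec : Claim_equal_has_character_substitution_py := by
  intro s1 s2 _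
  unfold Spec_has_character_substitution_py has_character_substitution_py
    has_character_substitution_py_alt
  dsimp only
  rw [PySem.List.slice_from_natCast, PySem.List.slice_from_natCast,
    pvLoopA_eq, pvLoopA_eq, pvCpl_comm s2.toList s1.toList]
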